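-- pv_equiv track=rewrite | github.com/Dilan/interviewproblems | coast_length.py | calculate_coast_length
-- ===== SOURCE A (Python) =====
-- def neigbours(x,y,coast):
--     result = []
--     conditions = [
--         lambda x,y: (x+1,y),
--         lambda x,y: (x-1,y),
--         lambda x,y: (x,y+1),
--         lambda x,y: (x,y-1)
--     ]
--     for xy in conditions:
--         x0, y0 = xy(x,y)
--         if x0 >= 0 and x0 < len(coast) and y0 >=0 and y0 < len(coast[x0]):
--             result.append((x0,y0))
--     return result
--
-- def swim(x,y,coast,visited):
--     visited[(x,y)] = True
--     for xy in neigbours(x,y,coast):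
--         if coast[xy[0]][xy[1]] == "0" and (xy[0],xy[1]) not in visited:
--             swim(xy[0], xy[1], coast, visited)
--
-- def calculate_coast_length(input):
--     # wrap with more sea water
--     coast = []
--     coast.append(['0'] * (2+len(input[0])))
--     for row in input:
--         coast.append(['0'] + list(row) + ['0'])
--     coast.append(['0'] * (2+len(input[0])))
--
--     visited = { }
--     swim(0, 0, coast, visited)
--
--     # mark lakes
--     for x, line in enumerate(coast):
--         for y, val in enumerate(line):
--             if val == '0' and (x,y) not in visited:
--                 coast[x][y] = 'w'
--
--     counter = 0
--     for x, line in enumerate(coast):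
--         for y, val in enumerate(line):
--             if val == '1':
--                 for xy in neigbours(x,y,coast):
--                     if coast[xy[0]][xy[1]] == '0':
--                         counter +=1
--
--     return counter
-- ===== SOURCE B (Python) =====
-- def neigbours(x, y, coast):
--     result = []
--     conditions = [
--         lambda x, y: (x+1, y),
--         lambda x, y: (x-1, y),
--         lambda x, y: (x, y+1),
--         lambda x, y: (x, y-1)
--     ]
--     for xy in conditions:
--         x0, y0 = xy(x, y)
--         if x0 >= 0 and x0 < len(coast) and y0 >= 0 and y0 < len(coast[x0]):
--             result.append((x0, y0))
--     return result
--
-- def calculate_coast_length(input):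
--     # wrap with more sea water
--     coast = []
--     coast.append(['0'] * (2+len(input[0])))
--     for row in input:
--         coast.append(['0'] + list(row) + ['0'])
--     coast.append(['0'] * (2+len(input[0])))
--
--     # iterative flood fill of the outside ocean; count land edges as we go
--     counter = 0
--     visited = set()
--     stack = [(0, 0)]
--     while stack:
--         cell = stack.pop()
--         if cell in visited:
--             continue
--         visited.add(cell)
--         for nx, ny in neigbours(cell[0], cell[1], coast):
--             if coast[nx][ny] == '1':
--                 counter += 1
--             elif coast[nx][ny] == '0' and (nx, ny) not in visited:
--                 stack.append((nx, ny))
--     return counter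
-- ===== Notes on version B (the rewrite author's own statement) =====
-- stated objective: simpler
-- what changed: One iterative stack-based flood fill of the outside ocean that counts land-ocean boundary edges from the ocean side as cells are visited, replacing A's recursive fill plus a lake-marking rewrite pass plus a separate double scan counting from the land side.
import Mathlib
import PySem

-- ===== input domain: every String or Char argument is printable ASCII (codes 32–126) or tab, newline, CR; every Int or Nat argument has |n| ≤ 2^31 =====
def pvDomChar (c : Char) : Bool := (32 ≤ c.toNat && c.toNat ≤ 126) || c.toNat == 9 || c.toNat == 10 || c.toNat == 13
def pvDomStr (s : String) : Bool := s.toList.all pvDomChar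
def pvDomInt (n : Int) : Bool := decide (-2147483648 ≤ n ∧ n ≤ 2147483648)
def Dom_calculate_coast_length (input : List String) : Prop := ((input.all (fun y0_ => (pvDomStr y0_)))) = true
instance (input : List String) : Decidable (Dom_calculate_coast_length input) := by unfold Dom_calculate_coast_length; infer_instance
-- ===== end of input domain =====

-- B replaces A's recursive flood fill + lake-marking pass + land-side double scan by one
-- iterative stack flood fill of the outside ocean that counts land-ocean edges as it visits
-- each ocean cell (objective: simpler, one pass instead of three).

-- ===== PORT A =====
-- helper 'neigbours' is shared verbatim by both Python versions
def neigbours (x y : Int) (coast : List (List Char)) : List (Int × Int) :=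
  ([(x+1,y),(x-1,y),(x,y+1),(x,y-1)] : List (Int × Int)).foldl
    (fun result p =>
      if 0 ≤ p.1 ∧ p.1 < (coast.length : Int) ∧ 0 ≤ p.2 ∧
          p.2 < (((PySem.List.pyGet? coast p.1).getD []).length : Int)
      then result ++ [p] else result) []

-- coast[c.1][c.2]; only evaluated at in-bounds cells (guarded by 'neigbours' / enumerate), where it is exact
def cellVal (coast : List (List Char)) (c : Int × Int) : Char :=
  (PySem.List.pyGet? ((PySem.List.pyGet? coast c.1).getD []) c.2).getD '?'

-- both Python versions wrap the grid identically
def wrapCoast (input : List String) : List (List Char) :=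
  (List.replicate (2 + ((PySem.List.pyGet? input 0).getD "").toList.length) '0'
    :: input.map (fun row => '0' :: (row.toList ++ ['0'])))
  ++ [List.replicate (2 + ((PySem.List.pyGet? input 0).getD "").toList.length) '0']

def totalCells (coast : List (List Char)) : Nat := (coast.map List.length).sum

-- A's recursive 'swim'; the Nat argument is fuel (totality plumbing only: the call below
-- supplies more fuel than the recursion can ever use, since each call visits a fresh cell)
def swim : Nat → Int → Int → List (List Char) → PySem.Dict (Int × Int) Bool → PySem.Dict (Int × Int) Bool
  | 0, _, _, _, visited => visited
  | f+1, x, y, coast, visited =>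
    (neigbours x y coast).foldl
      (fun v w =>
        if cellVal coast w == '0' && !(v.contains w) then swim f w.1 w.2 coast v else v)
      (visited.insert (x, y) true)

def calculate_coast_length (input : List String) : Int :=
  let coast := wrapCoast input
  let visited := swim (totalCells coast + 1) 0 0 coast PySem.Dict.empty
  -- mark lakes
  let coast2 := (PySem.List.enumerate coast).map (fun xl =>
    (PySem.List.enumerate xl.2).map (fun yv =>
      if yv.2 == '0' && !(visited.contains (xl.1, yv.1)) then 'w' else yv.2))
  -- count
  (PySem.List.enumerate coast2).foldl (fun counter xl =>
    (PySem.List.enumerate xl.2).foldl (fun counter yv =>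
      if yv.2 == '1' then
        (neigbours xl.1 yv.1 coast2).foldl (fun counter w =>
          if cellVal coast2 w == '0' then counter + 1 else counter) counter
      else counter) counter) 0

-- ===== PORT B =====
-- the while-stack loop of Source B; Nat fuel is totality plumbing only (bounded by pops ≤ 1 + pushes)
def coastFill : Nat → List (Int × Int) → PySem.Set (Int × Int) → Int → List (List Char) →
    PySem.Set (Int × Int) × Int
  | 0, _, visited, counter, _ => (visited, counter)
  | _+1, [], visited, counter, _ => (visited, counter)
  | f+1, cell :: stack, visited, counter, coast =>
    if PySem.Set.contains visited cell then coastFill f stack visited counter coast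
    else
      let visited' := PySem.Set.add visited cell
      let sc := (neigbours cell.1 cell.2 coast).foldl
        (fun sc w =>
          if cellVal coast w == '1' then (sc.1, sc.2 + 1)
          else if cellVal coast w == '0' && !(PySem.Set.contains visited' w) then (w :: sc.1, sc.2)
          else sc)
        (stack, counter)
      coastFill f sc.1 visited' sc.2 coast

def calculate_coast_length_alt (input : List String) : Int :=
  let coast := wrapCoast input
  (coastFill (1 + 5 * totalCells coast) [((0:Int), (0:Int))] PySem.Set.empty 0 coast).2

-- ===== PRECONDITION & SPEC =====
-- Pre_ excludes only the empty list, on which the Python A raises IndexError at input[0]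
def Pre_calculate_coast_length (input : List String) : Prop := input ≠ []
instance (input : List String) : Decidable (Pre_calculate_coast_length input) := by
  unfold Pre_calculate_coast_length; infer_instance
def pvWitness_calculate_coast_length : List String := ["1"]

def Spec_calculate_coast_length (input : List String) (out : Int) : Prop :=
  out = calculate_coast_length_alt input
instance (input : List String) (out : Int) : Decidable (Spec_calculate_coast_length input out) := by
  unfold Spec_calculate_coast_length; infer_instance

-- ===== CLAIM (what is proved, stated in full; the proofs are below) =====
def Claim_equal_calculate_coast_length : Prop :=
  ∀ (input : List String), Dom_calculate_coast_length input →
    Pre_calculate_coast_length input →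
    Spec_calculate_coast_length input (calculate_coast_length input)

-- ===== LEMMAS AND PROOFS =====

-- the four candidate neighbours, bounds check, cells of the grid
def fourNbrs (c : Int × Int) : List (Int × Int) :=
  [(c.1+1,c.2),(c.1-1,c.2),(c.1,c.2+1),(c.1,c.2-1)]

abbrev inGrid (g : List (List Char)) (c : Int × Int) : Prop :=
  0 ≤ c.1 ∧ c.1 < (g.length : Int) ∧ 0 ≤ c.2 ∧
    c.2 < (((PySem.List.pyGet? g c.1).getD []).length : Int)

def gridList (g : List (List Char)) : List (Int × Int) :=
  (PySem.List.pyRange 0 g.length 1).flatMap (fun x =>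
    (PySem.List.pyRange 0 ((PySem.List.pyGet? g x).getD []).length 1).map (fun y => (x, y)))

def oceanAdj (g : List (List Char)) (c w : Int × Int) : Prop :=
  w ∈ neigbours c.1 c.2 g ∧ cellVal g w = '0'

def Reach (g : List (List Char)) (c : Int × Int) : Prop :=
  Relation.ReflTransGen (oceanAdj g) (0, 0) c

theorem neigbours_eq (x y : Int) (g : List (List Char)) :
    neigbours x y g = (fourNbrs (x, y)).filter (fun p => decide (inGrid g p)) := by
  unfold neigbours fourNbrs inGrid
  rw [PySem.List.foldl_append_ite_eq_filter]
  simp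

theorem mem_neigbours {g : List (List Char)} {x y : Int} {w : Int × Int} :
    w ∈ neigbours x y g ↔ w ∈ fourNbrs (x, y) ∧ inGrid g w := by
  rw [neigbours_eq]
  simp [List.mem_filter]

theorem mem_fourNbrs_comm {c w : Int × Int} : w ∈ fourNbrs c ↔ c ∈ fourNbrs w := by
  obtain ⟨a, b⟩ := c; obtain ⟨d, e⟩ := w
  simp only [fourNbrs, List.mem_cons, List.not_mem_nil, or_false, Prod.mk.injEq]
  omega

theorem nodup_neigbours (x y : Int) (g : List (List Char)) : (neigbours x y g).Nodup := by
  rw [neigbours_eq]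
  refine List.Nodup.filter _ ?_
  obtain ⟨a, b⟩ := (⟨x, y⟩ : Int × Int)
  simp [fourNbrs, Prod.ext_iff]
  omega

theorem length_neigbours_le (x y : Int) (g : List (List Char)) :
    (neigbours x y g).length ≤ 4 := by
  rw [neigbours_eq]
  have h := List.length_filter_le (fun p => decide (inGrid g p)) (fourNbrs (x, y))
  simpa [fourNbrs] using h

theorem mem_gridList {g : List (List Char)} {c : Int × Int} :
    c ∈ gridList g ↔ inGrid g c := by
  obtain ⟨a, b⟩ := c
  unfold gridList inGrid
  simp only [List.mem_flatMap, List.mem_map, PySem.List.mem_pyRange_one, Prod.mk.injEq]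
  constructor
  · rintro ⟨x, ⟨hx0, hx1⟩, y, ⟨hy0, hy1⟩, rfl, rfl⟩
    exact ⟨hx0, hx1, hy0, hy1⟩
  · rintro ⟨h1, h2, h3, h4⟩
    exact ⟨a, ⟨h1, h2⟩, b, ⟨h3, h4⟩, rfl, rfl⟩

theorem nodup_gridList (g : List (List Char)) : (gridList g).Nodup := by
  unfold gridList
  rw [List.nodup_flatMap]
  refine ⟨fun x _ => ?_, ?_⟩
  · exact (PySem.List.nodup_pyRange_one _ _).map (fun y z h => by simpa using h)
  · refine (PySem.List.nodup_pyRange_one _ _).imp ?_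
    intro x x' hne
    simp only [Function.onFun]
    rw [List.disjoint_left]
    rintro ⟨a, b⟩ h1 h2
    simp only [Function.comp, List.mem_map, Prod.mk.injEq] at h1 h2
    obtain ⟨y, _, rfl, rfl⟩ := h1
    obtain ⟨y', _, h, _⟩ := h2
    exact hne h.symm

theorem length_gridList (g : List (List Char)) : (gridList g).length = totalCells g := by
  unfold gridList totalCells
  rw [List.length_flatMap]
  congr 1
  apply List.ext_getElem
  · simp [PySem.List.length_pyRange_one]
  · intro i h1 h2
    simp only [List.length_map, PySem.List.length_pyRange_one] at h1
    rw [List.getElem_map, List.getElem_map, PySem.List.getElem_pyRange_one]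
    have hi : i < g.length := by omega
    simp [PySem.List.pyGet?_natCast, PySem.List.length_pyRange_one, hi]


-- measures: number of grid cells not yet visited
def measD (g : List (List Char)) (v : PySem.Dict (Int × Int) Bool) : Nat :=
  ((gridList g).filter (fun c => !(v.contains c))).length

def measS (g : List (List Char)) (v : PySem.Set (Int × Int)) : Nat :=
  ((gridList g).filter (fun c => !(PySem.Set.contains v c))).length

theorem length_filter_le_of_imp {α : Type} (l : List α) (p q : α → Bool)
    (h : ∀ a, q a = true → p a = true) :
    (l.filter q).length ≤ (l.filter p).length := by
  induction l with
  | nil => simp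
  | cons a t ih =>
    by_cases hq : q a = true
    · simp [List.filter_cons, hq, h a hq]; omega
    · simp only [Bool.not_eq_true] at hq
      cases hp : p a <;> simp [List.filter_cons, hq, hp] <;> omega

theorem length_filter_lt {α : Type} (l : List α) (p q : α → Bool) (c : α)
    (hc : c ∈ l) (hp : p c = true) (hq : q c = false)
    (h : ∀ a, q a = true → p a = true) :
    (l.filter q).length < (l.filter p).length := by
  induction l with
  | nil => simp at hc
  | cons a t ih =>
    rcases List.mem_cons.1 hc with rfl | hc
    · have hle := length_filter_le_of_imp t p q h
      simp only [List.filter_cons, hp, hq, if_true, Bool.false_eq_true, if_false,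
        List.length_cons]
      omega
    · by_cases hqa : q a = true
      · have := ih hc; simp [List.filter_cons, hqa, h a hqa]; omega
      · simp only [Bool.not_eq_true] at hqa
        cases hpa : p a <;> simp [List.filter_cons, hqa, hpa] <;> [exact ih hc; skip]
        have := ih hc; omega

theorem contains_false_of_mono {v v' : PySem.Dict (Int × Int) Bool}
    (mono : ∀ a, v.contains a = true → v'.contains a = true) :
    ∀ a, v'.contains a = false → v.contains a = false := by
  intro a ha
  cases h : v.contains a
  · rfl
  · rw [mono a h] at ha; exact ha

theorem measD_lt (g : List (List Char)) (v v' : PySem.Dict (Int × Int) Bool)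
    (w : Int × Int) (hwg : inGrid g w) (hwv : v.contains w = false)
    (hwv' : v'.contains w = true)
    (mono : ∀ a, v.contains a = true → v'.contains a = true) :
    measD g v' < measD g v := by
  refine length_filter_lt _ _ _ w (mem_gridList.2 hwg) (by simp [hwv]) (by simp [hwv']) ?_
  intro a ha
  simp only [Bool.not_eq_true'] at ha ⊢
  exact contains_false_of_mono mono a ha

def swimStep (g : List (List Char)) (f : Nat) (v : PySem.Dict (Int × Int) Bool)
    (w : Int × Int) : PySem.Dict (Int × Int) Bool :=
  if cellVal g w == '0' && !(v.contains w) then swim f w.1 w.2 g v else v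

theorem swim_fold (g : List (List Char)) (f : Nat)
    (IH : ∀ (c : Int × Int) (v : PySem.Dict (Int × Int) Bool),
      inGrid g c → v.contains c = false → measD g v + 1 ≤ f →
      ((∀ a, v.contains a = true → (swim f c.1 c.2 g v).contains a = true) ∧
       (swim f c.1 c.2 g v).contains c = true ∧
       (∀ a, (swim f c.1 c.2 g v).contains a = true →
          v.contains a = true ∨ Relation.ReflTransGen (oceanAdj g) c a) ∧
       (∀ a, (swim f c.1 c.2 g v).contains a = true → v.contains a = false →
          ∀ u, oceanAdj g a u → (swim f c.1 c.2 g v).contains u = true))) :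
    ∀ (ws : List (Int × Int)) (v : PySem.Dict (Int × Int) Bool),
      (∀ w ∈ ws, inGrid g w) → measD g v + 1 ≤ f →
      ((∀ a, v.contains a = true → (ws.foldl (swimStep g f) v).contains a = true) ∧
       (∀ a, (ws.foldl (swimStep g f) v).contains a = true →
          v.contains a = true ∨ ∃ w ∈ ws, cellVal g w = '0' ∧
            Relation.ReflTransGen (oceanAdj g) w a) ∧
       (∀ a, (ws.foldl (swimStep g f) v).contains a = true → v.contains a = false →
          ∀ u, oceanAdj g a u → (ws.foldl (swimStep g f) v).contains u = true) ∧
       (∀ w ∈ ws, cellVal g w = '0' → (ws.foldl (swimStep g f) v).contains w = true)) := by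
  intro ws
  induction ws with
  | nil =>
    intro v _ _
    refine ⟨fun a ha => ha, fun a ha => Or.inl ha, ?_, by simp⟩
    intro a ha hna u _
    rw [List.foldl_nil, hna] at ha
    exact absurd ha (by simp)
  | cons w ws ih =>
    intro v hin hf
    have hw : inGrid g w := hin w (List.mem_cons_self)
    have mono1 : ∀ a, v.contains a = true → (swimStep g f v w).contains a = true := by
      intro a ha
      unfold swimStep
      split
      · rename_i hcond
        simp only [Bool.and_eq_true, beq_iff_eq, Bool.not_eq_true'] at hcond
        exact (IH w v hw hcond.2 hf).1 a ha
      · exact ha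
    have meas1 : measD g (swimStep g f v w) + 1 ≤ f := by
      unfold swimStep
      split
      · rename_i hcond
        simp only [Bool.and_eq_true, beq_iff_eq, Bool.not_eq_true'] at hcond
        have hlt : measD g (swim f w.1 w.2 g v) < measD g v :=
          measD_lt g v _ w hw hcond.2 (IH w v hw hcond.2 hf).2.1 (IH w v hw hcond.2 hf).1
        omega
      · omega
    have reach1 : ∀ a, (swimStep g f v w).contains a = true →
        v.contains a = true ∨ (cellVal g w = '0' ∧ Relation.ReflTransGen (oceanAdj g) w a) := by
      intro a ha
      unfold swimStep at ha
      split at ha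
      · rename_i hcond
        simp only [Bool.and_eq_true, beq_iff_eq, Bool.not_eq_true'] at hcond
        rcases (IH w v hw hcond.2 hf).2.2.1 a ha with h | h
        · exact Or.inl h
        · exact Or.inr ⟨hcond.1, h⟩
      · exact Or.inl ha
    have clos1 : ∀ a, (swimStep g f v w).contains a = true → v.contains a = false →
        ∀ u, oceanAdj g a u → (swimStep g f v w).contains u = true := by
      intro a ha hna u hu
      by_cases hcond : (cellVal g w == '0' && !(v.contains w)) = true
      · simp only [swimStep, hcond, if_true] at ha ⊢
        simp only [Bool.and_eq_true, beq_iff_eq, Bool.not_eq_true'] at hcond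
        exact (IH w v hw hcond.2 hf).2.2.2 a ha hna u hu
      · simp only [swimStep, hcond, Bool.false_eq_true, if_false] at ha ⊢
        rw [hna] at ha
        exact absurd ha (by simp)
    have self1 : cellVal g w = '0' → (swimStep g f v w).contains w = true := by
      intro hoc
      by_cases hcond : (cellVal g w == '0' && !(v.contains w)) = true
      · simp only [swimStep, hcond, if_true]
        simp only [Bool.and_eq_true, beq_iff_eq, Bool.not_eq_true'] at hcond
        exact (IH w v hw hcond.2 hf).2.1
      · simp only [swimStep, hcond, Bool.false_eq_true, if_false]
        simp only [Bool.and_eq_true, beq_iff_eq, Bool.not_eq_true', not_and] at hcond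
        have := hcond hoc
        simpa using this
    obtain ⟨M, R, C, S⟩ := ih (swimStep g f v w)
      (fun x hx => hin x (List.mem_cons_of_mem _ hx)) meas1
    simp only [List.foldl_cons]
    refine ⟨fun a ha => M a (mono1 a ha), ?_, ?_, ?_⟩
    · intro a ha
      rcases R a ha with h1 | ⟨w', hw', hoc, hr⟩
      · rcases reach1 a h1 with h2 | ⟨hoc, hr⟩
        · exact Or.inl h2
        · exact Or.inr ⟨w, List.mem_cons_self, hoc, hr⟩
      · exact Or.inr ⟨w', List.mem_cons_of_mem _ hw', hoc, hr⟩
    · intro a ha hna u hu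
      by_cases h1 : (swimStep g f v w).contains a = true
      · exact M u (clos1 a h1 hna u hu)
      · have h1' : (swimStep g f v w).contains a = false := by
          cases h : (swimStep g f v w).contains a
          · rfl
          · exact absurd h h1
        exact C a ha h1' u hu
    · intro w' hw' hoc
      rcases List.mem_cons.1 hw' with rfl | hw'
      · exact M w' (self1 hoc)
      · exact S w' hw' hoc

theorem swim_spec (g : List (List Char)) :
    ∀ (f : Nat) (c : Int × Int) (v : PySem.Dict (Int × Int) Bool),
      inGrid g c → v.contains c = false → measD g v + 1 ≤ f →
      ((∀ a, v.contains a = true → (swim f c.1 c.2 g v).contains a = true) ∧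
       (swim f c.1 c.2 g v).contains c = true ∧
       (∀ a, (swim f c.1 c.2 g v).contains a = true →
          v.contains a = true ∨ Relation.ReflTransGen (oceanAdj g) c a) ∧
       (∀ a, (swim f c.1 c.2 g v).contains a = true → v.contains a = false →
          ∀ u, oceanAdj g a u → (swim f c.1 c.2 g v).contains u = true)) := by
  intro f
  induction f with
  | zero => intro c v _ _ hf; exact absurd hf (by omega)
  | succ f ihf =>
    intro c v hc hv hf
    have hrw : swim (f + 1) c.1 c.2 g v
        = (neigbours c.1 c.2 g).foldl (swimStep g f) (v.insert (c.1, c.2) true) := rfl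
    rw [Prod.mk.eta] at hrw
    have hv0c : (v.insert c true).contains c = true := by
      rw [PySem.Dict.contains_insert]; simp
    have hmono0 : ∀ a, v.contains a = true → (v.insert c true).contains a = true := by
      intro a ha
      rw [PySem.Dict.contains_insert, ha, Bool.or_true]
    have meas0 : measD g (v.insert c true) + 1 ≤ f := by
      have := measD_lt g v (v.insert c true) c hc hv hv0c hmono0
      omega
    obtain ⟨M, R, C, S⟩ := swim_fold g f ihf (neigbours c.1 c.2 g) (v.insert c true)
      (fun w hw => (mem_neigbours.1 hw).2) meas0
    rw [hrw]
    refine ⟨fun a ha => M a (hmono0 a ha), M c hv0c, ?_, ?_⟩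
    · intro a ha
      rcases R a ha with h1 | ⟨w, hwmem, hoc, hr⟩
      · rw [PySem.Dict.contains_insert] at h1
        rcases Bool.or_eq_true_iff.1 h1 with h2 | h2
        · exact Or.inr (by rw [eq_of_beq h2])
        · exact Or.inl h2
      · exact Or.inr (Relation.ReflTransGen.head ⟨hwmem, hoc⟩ hr)
    · intro a ha hna u hu
      by_cases h1 : (v.insert c true).contains a = true
      · rw [PySem.Dict.contains_insert] at h1
        rcases Bool.or_eq_true_iff.1 h1 with h2 | h2
        · have hac : a = c := eq_of_beq h2
          subst hac
          exact S u hu.1 hu.2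
        · rw [h2] at hna; exact absurd hna (by simp)
      · have h1' : (v.insert c true).contains a = false := by
          cases h : (v.insert c true).contains a
          · rfl
          · exact absurd h h1
        exact C a ha h1' u hu

theorem swim_reach (g : List (List Char)) (h0 : inGrid g (0, 0)) (a : Int × Int) :
    (swim (totalCells g + 1) 0 0 g PySem.Dict.empty).contains a = true ↔ Reach g a := by
  have hvc : (PySem.Dict.empty : PySem.Dict (Int × Int) Bool).contains ((0, 0) : Int × Int) = false :=
    PySem.Dict.contains_empty _
  have hmea : measD g (PySem.Dict.empty : PySem.Dict (Int × Int) Bool) + 1 ≤ totalCells g + 1 := by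
    have h1 : measD g (PySem.Dict.empty : PySem.Dict (Int × Int) Bool) ≤ (gridList g).length :=
      List.length_filter_le _ _
    rw [length_gridList] at h1
    omega
  have hs := swim_spec g (totalCells g + 1) (0, 0) PySem.Dict.empty h0 hvc hmea
  constructor
  · intro ha
    rcases hs.2.2.1 a ha with h | h
    · rw [PySem.Dict.contains_empty] at h; exact absurd h (by simp)
    · exact h
  · intro hr
    induction hr with
    | refl => exact hs.2.1
    | tail h1 h2 ih => exact hs.2.2.2 _ ih (PySem.Dict.contains_empty _) _ h2

-- ----- B side: the stack flood fill -----

theorem set_add_eq_append {s : PySem.Set (Int × Int)} {c : Int × Int} (h : c ∉ s) :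
    PySem.Set.add s c = s ++ [c] := by
  unfold PySem.Set.add
  rw [if_neg]
  simp only [PySem.Set.contains_eq_listContains]
  simp [h]

theorem measS_lt (g : List (List Char)) (v : PySem.Set (Int × Int)) (c : Int × Int)
    (hcg : inGrid g c) (hcv : c ∉ v) : measS g (PySem.Set.add v c) < measS g v := by
  refine length_filter_lt _ _ _ c (mem_gridList.2 hcg) ?_ ?_ ?_
  · simp only [Bool.not_eq_true', PySem.Set.contains_eq_listContains]
    simp [hcv]
  · simp only [Bool.not_eq_true', PySem.Set.contains_eq_listContains]
    simp [PySem.Set.mem_add _ _ _]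
  · intro a ha
    simp only [Bool.not_eq_true', PySem.Set.contains_eq_listContains] at ha ⊢
    simp only [List.contains_eq_mem, decide_eq_false_iff_not] at ha ⊢
    intro hav
    exact ha ((PySem.Set.mem_add _ _ _).2 (Or.inl hav))

theorem fill_inner (g : List (List Char)) (v' : PySem.Set (Int × Int)) :
    ∀ (ws : List (Int × Int)) (st : List (Int × Int)) (ctr : Int),
      ws.foldl (fun sc w =>
          if cellVal g w == '1' then (sc.1, sc.2 + 1)
          else if cellVal g w == '0' && !(PySem.Set.contains v' w) then (w :: sc.1, sc.2)
          else sc) (st, ctr)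
      = ((ws.filter (fun w => cellVal g w == '0' && !(PySem.Set.contains v' w))).reverse ++ st,
         ctr + ((ws.countP (fun w => cellVal g w == '1') : Nat) : Int)) := by
  intro ws
  induction ws with
  | nil => simp
  | cons w ws ih =>
    intro st ctr
    by_cases h1 : (cellVal g w == '1') = true
    · have h0 : (cellVal g w == '0') = false := by
        rw [beq_iff_eq] at h1; simp [h1]
      simp only [List.foldl_cons, h1, if_true, List.filter_cons, h0, Bool.false_and,
        Bool.false_eq_true, if_false, List.countP_cons, h1]
      rw [ih]
      simp only [Prod.mk.injEq]
      refine ⟨trivial, by push_cast; ring⟩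
    · by_cases h2 : (cellVal g w == '0' && !(PySem.Set.contains v' w)) = true
      · simp only [List.foldl_cons, h1, Bool.false_eq_true, if_false, h2, if_true,
          List.filter_cons, List.countP_cons]
        rw [ih]
        simp [h1]
      · simp only [List.foldl_cons, h1, Bool.false_eq_true, if_false, h2,
          List.filter_cons, List.countP_cons]
        rw [ih]
        simp [h1, h2]

def landCnt (g : List (List Char)) (c : Int × Int) : Nat :=
  (neigbours c.1 c.2 g).countP (fun w => cellVal g w == '1')

theorem fill_spec (g : List (List Char)) :
    ∀ (f : Nat) (stack : List (Int × Int)) (v : PySem.Set (Int × Int)) (ctr : Int),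
      (∀ c ∈ stack, inGrid g c) → v.Nodup → stack.length + 5 * measS g v ≤ f →
      ((∀ a, a ∈ v → a ∈ (coastFill f stack v ctr g).1) ∧
       (coastFill f stack v ctr g).1.Nodup ∧
       (∀ a, a ∈ (coastFill f stack v ctr g).1 → a ∈ v ∨
          ∃ w ∈ stack, Relation.ReflTransGen (oceanAdj g) w a) ∧
       (∀ w ∈ stack, w ∈ (coastFill f stack v ctr g).1) ∧
       (∀ a, a ∈ (coastFill f stack v ctr g).1 → a ∉ v →
          ∀ u, oceanAdj g a u → u ∈ (coastFill f stack v ctr g).1) ∧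
       (∃ Δ, (coastFill f stack v ctr g).1 = v ++ Δ ∧
          (coastFill f stack v ctr g).2 = ctr + ((Δ.map (fun c => ((landCnt g c : Nat) : Int))).sum))) := by
  intro f
  induction f with
  | zero =>
    intro stack v ctr hin hnd hf
    have hst : stack = [] := by
      cases stack with
      | nil => rfl
      | cons a t => simp at hf
    subst hst
    refine ⟨fun a ha => ha, hnd, fun a ha => Or.inl ha, by simp, ?_,
      ⟨[], by simp [coastFill], by simp [coastFill]⟩⟩
    intro a ha hna u _
    exact absurd ha hna
  | succ f ihf =>
    intro stack v ctr hin hnd hf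
    cases stack with
    | nil =>
      refine ⟨fun a ha => ha, hnd, fun a ha => Or.inl ha, by simp, ?_,
        ⟨[], by simp [coastFill], by simp [coastFill]⟩⟩
      intro a ha hna u _
      exact absurd ha hna
    | cons c rest =>
      by_cases hc : PySem.Set.contains v c = true
      · have hrw : coastFill (f + 1) (c :: rest) v ctr g = coastFill f rest v ctr g := by
          rw [coastFill, if_pos hc]
        have hlen : rest.length + 5 * measS g v ≤ f := by
          simp only [List.length_cons] at hf; omega
        obtain ⟨M, ND, R, ST, C, hΔ⟩ :=
          ihf rest v ctr (fun x hx => hin x (List.mem_cons_of_mem _ hx)) hnd hlen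
        rw [hrw]
        refine ⟨M, ND, ?_, ?_, C, hΔ⟩
        · intro a ha
          rcases R a ha with h | ⟨w, hw, hr⟩
          · exact Or.inl h
          · exact Or.inr ⟨w, List.mem_cons_of_mem _ hw, hr⟩
        · intro w hw
          rcases List.mem_cons.1 hw with rfl | hw
          · exact M w ((PySem.Set.contains_iff _ _).1 hc)
          · exact ST w hw
      · have hcmem : c ∉ v := by
          intro hmem
          exact hc ((PySem.Set.contains_iff _ _).2 hmem)
        have hcg : inGrid g c := hin c List.mem_cons_self
        have hstep : coastFill (f + 1) (c :: rest) v ctr g =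
            coastFill f
              (((neigbours c.1 c.2 g).filter
                  (fun w => cellVal g w == '0' && !(PySem.Set.contains (PySem.Set.add v c) w))).reverse
                ++ rest)
              (PySem.Set.add v c)
              (ctr + (((neigbours c.1 c.2 g).countP (fun w => cellVal g w == '1') : Nat) : Int)) g := by
          rw [coastFill, if_neg hc]
          simp only [fill_inner]
        have hinS : ∀ x ∈ ((neigbours c.1 c.2 g).filter
            (fun w => cellVal g w == '0' && !(PySem.Set.contains (PySem.Set.add v c) w))).reverse
            ++ rest, inGrid g x := by
          intro x hx
          rcases List.mem_append.1 hx with hx | hx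
          · rw [List.mem_reverse] at hx
            exact (mem_neigbours.1 (List.mem_of_mem_filter hx)).2
          · exact hin x (List.mem_cons_of_mem _ hx)
        have hndv' : (PySem.Set.add v c).Nodup := by
          rw [set_add_eq_append hcmem]
          exact List.Nodup.append hnd (List.nodup_singleton c)
            (fun x hx hxc => hcmem (by rwa [List.mem_singleton.1 hxc] at hx))
        have hfuel : (((neigbours c.1 c.2 g).filter
              (fun w => cellVal g w == '0' && !(PySem.Set.contains (PySem.Set.add v c) w))).reverse
              ++ rest).length + 5 * measS g (PySem.Set.add v c) ≤ f := by
          have h4 : ((neigbours c.1 c.2 g).filter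
              (fun w => cellVal g w == '0' && !(PySem.Set.contains (PySem.Set.add v c) w))).length ≤ 4 :=
            Nat.le_trans (List.length_filter_le _ _) (length_neigbours_le c.1 c.2 g)
          have hm : measS g (PySem.Set.add v c) < measS g v := measS_lt g v c hcg hcmem
          simp only [List.length_append, List.length_reverse, List.length_cons] at hf ⊢
          omega
        obtain ⟨M, ND, R, ST, C, ⟨Δ, hΔ1, hΔ2⟩⟩ := ihf _ (PySem.Set.add v c) _ hinS hndv' hfuel
        rw [hstep]
        refine ⟨?_, ND, ?_, ?_, ?_, ?_⟩
        · intro a ha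
          exact M a ((PySem.Set.mem_add _ _ _).2 (Or.inl ha))
        · intro a ha
          rcases R a ha with h | ⟨w, hw, hr⟩
          · rcases (PySem.Set.mem_add _ _ _).1 h with h | rfl
            · exact Or.inl h
            · exact Or.inr ⟨a, List.mem_cons_self, Relation.ReflTransGen.refl⟩
          · rcases List.mem_append.1 hw with hw | hw
            · rw [List.mem_reverse] at hw
              have hcond := List.of_mem_filter hw
              simp only [Bool.and_eq_true, beq_iff_eq] at hcond
              exact Or.inr ⟨c, List.mem_cons_self,
                Relation.ReflTransGen.head ⟨List.mem_of_mem_filter hw, hcond.1⟩ hr⟩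
            · exact Or.inr ⟨w, List.mem_cons_of_mem _ hw, hr⟩
        · intro w hw
          rcases List.mem_cons.1 hw with rfl | hw
          · exact M w ((PySem.Set.mem_add _ _ _).2 (Or.inr rfl))
          · exact ST w (List.mem_append.2 (Or.inr hw))
        · intro a ha hnav u hu
          by_cases hav' : a ∈ PySem.Set.add v c
          · have hac : a = c := by
              rcases (PySem.Set.mem_add _ _ _).1 hav' with h | h
              · exact absurd h hnav
              · exact h
            subst hac
            obtain ⟨humem, huoc⟩ := hu
            by_cases huv : u ∈ PySem.Set.add v a
            · exact M u huv
            · have hcu : PySem.Set.contains (PySem.Set.add v a) u = false := by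
                cases h : PySem.Set.contains (PySem.Set.add v a) u
                · rfl
                · exact absurd ((PySem.Set.contains_iff _ _).1 h) huv
              refine ST u (List.mem_append.2 (Or.inl ?_))
              rw [List.mem_reverse]
              refine List.mem_filter.2 ⟨humem, ?_⟩
              simp only [Bool.and_eq_true, beq_iff_eq]
              refine ⟨huoc, by simp; exact ⟨fun h => huv ((PySem.Set.mem_add _ _ _).2 (Or.inl h)),
                fun h => huv ((PySem.Set.mem_add _ _ _).2 (Or.inr h))⟩⟩
          · exact C a ha hav' u hu
        · refine ⟨c :: Δ, ?_, ?_⟩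
          · rw [hΔ1, set_add_eq_append hcmem, List.append_assoc]
            rfl
          · rw [hΔ2]
            simp only [List.map_cons, List.sum_cons, landCnt]
            ring

theorem reach_inGrid {g : List (List Char)} (h0 : inGrid g (0, 0)) {a : Int × Int}
    (h : Reach g a) : inGrid g a := by
  induction h with
  | refl => exact h0
  | tail _ h2 _ => exact (mem_neigbours.1 h2.1).2

theorem reach_ocean {g : List (List Char)} (h0 : cellVal g (0, 0) = '0') {a : Int × Int}
    (h : Reach g a) : cellVal g a = '0' := by
  induction h with
  | refl => exact h0
  | tail _ h2 _ => exact h2.2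

theorem fill_main (g : List (List Char)) (h0 : inGrid g (0, 0)) :
    ((coastFill (1 + 5 * totalCells g) [((0:Int), (0:Int))] PySem.Set.empty 0 g).1.Nodup ∧
     (∀ a, a ∈ (coastFill (1 + 5 * totalCells g) [((0:Int), (0:Int))] PySem.Set.empty 0 g).1 ↔ Reach g a) ∧
     (coastFill (1 + 5 * totalCells g) [((0:Int), (0:Int))] PySem.Set.empty 0 g).2 =
       (((coastFill (1 + 5 * totalCells g) [((0:Int), (0:Int))] PySem.Set.empty 0 g).1.map
          (fun c => ((landCnt g c : Nat) : Int))).sum)) := by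
  have hmea : measS g (PySem.Set.empty : PySem.Set (Int × Int)) ≤ totalCells g := by
    have h1 : measS g (PySem.Set.empty : PySem.Set (Int × Int)) ≤ (gridList g).length :=
      List.length_filter_le _ _
    rw [length_gridList] at h1
    exact h1
  obtain ⟨M, ND, R, ST, C, ⟨Δ, hΔ1, hΔ2⟩⟩ := fill_spec g (1 + 5 * totalCells g)
    [((0:Int), (0:Int))] PySem.Set.empty 0
    (by intro x hx; rw [List.mem_singleton] at hx; subst hx; exact h0)
    List.nodup_nil (by simp only [List.length_cons, List.length_nil]; omega)
  refine ⟨ND, ?_, ?_⟩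
  · intro a
    constructor
    · intro ha
      rcases R a ha with h | ⟨w, hw, hr⟩
      · exact absurd h (List.not_mem_nil)
      · rw [List.mem_singleton] at hw
        subst hw
        exact hr
    · intro hr
      induction hr with
      | refl => exact ST _ (List.mem_singleton.2 rfl)
      | tail h1 h2 ih => exact C _ ih (List.not_mem_nil) _ h2
  · rw [hΔ2]
    have : Δ = (coastFill (1 + 5 * totalCells g) [((0:Int), (0:Int))] PySem.Set.empty 0 g).1 := by
      rw [hΔ1]; rfl
    rw [this]
    ring

-- ----- the lake-marking pass of A, abstractly -----

def markRow (vd : PySem.Dict (Int × Int) Bool) (k : Nat) (row : List Char) : List Char :=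
  (PySem.List.enumerate row).map (fun yv =>
    if yv.2 == '0' && !(vd.contains ((k : Int), yv.1)) then 'w' else yv.2)

def markedGrid (vd : PySem.Dict (Int × Int) Bool) (g : List (List Char)) : List (List Char) :=
  (PySem.List.enumerate g).map (fun xl =>
    (PySem.List.enumerate xl.2).map (fun yv =>
      if yv.2 == '0' && !(vd.contains (xl.1, yv.1)) then 'w' else yv.2))

theorem flatMap_congr_mem {α β : Type} {l : List α} {f h : α → List β}
    (hc : ∀ x ∈ l, f x = h x) : l.flatMap f = l.flatMap h := by
  induction l with
  | nil => rfl
  | cons a t ih =>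
    simp only [List.flatMap_cons]
    rw [hc a (List.mem_cons_self), ih (fun x hx => hc x (List.mem_cons_of_mem _ hx))]

theorem markRow_length (vd : PySem.Dict (Int × Int) Bool) (k : Nat) (row : List Char) :
    (markRow vd k row).length = row.length := by
  unfold markRow
  rw [List.length_map, PySem.List.length_enumerate]

theorem marked_length (vd : PySem.Dict (Int × Int) Bool) (g : List (List Char)) :
    (markedGrid vd g).length = g.length := by
  unfold markedGrid
  rw [List.length_map, PySem.List.length_enumerate]

theorem marked_getElem? (vd : PySem.Dict (Int × Int) Bool) (g : List (List Char)) (k : Nat) :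
    (markedGrid vd g)[k]? = (g[k]?).map (markRow vd k) := by
  unfold markedGrid markRow
  rw [List.getElem?_map, PySem.List.getElem?_enumerate]
  cases g[k]? <;> simp

theorem marked_pyGet? (vd : PySem.Dict (Int × Int) Bool) (g : List (List Char)) (i : Int)
    (h : 0 ≤ i) :
    (PySem.List.pyGet? (markedGrid vd g) i).getD []
      = markRow vd i.toNat ((PySem.List.pyGet? g i).getD []) := by
  rw [PySem.List.pyGet?_of_nonneg _ h, PySem.List.pyGet?_of_nonneg _ h, marked_getElem?]
  cases g[i.toNat]? <;> simp [markRow]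

theorem inGrid_marked (vd : PySem.Dict (Int × Int) Bool) (g : List (List Char)) (p : Int × Int) :
    inGrid (markedGrid vd g) p ↔ inGrid g p := by
  unfold inGrid
  rw [marked_length]
  constructor
  · rintro ⟨h1, h2, h3, h4⟩
    rw [marked_pyGet? vd g p.1 h1, markRow_length] at h4
    exact ⟨h1, h2, h3, h4⟩
  · rintro ⟨h1, h2, h3, h4⟩
    rw [marked_pyGet? vd g p.1 h1, markRow_length]
    exact ⟨h1, h2, h3, h4⟩

theorem neigbours_marked (vd : PySem.Dict (Int × Int) Bool) (g : List (List Char)) (x y : Int) :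
    neigbours x y (markedGrid vd g) = neigbours x y g := by
  rw [neigbours_eq, neigbours_eq]
  apply List.filter_congr
  intro p _
  simp [inGrid_marked]

theorem gridList_marked (vd : PySem.Dict (Int × Int) Bool) (g : List (List Char)) :
    gridList (markedGrid vd g) = gridList g := by
  unfold gridList
  rw [marked_length]
  refine flatMap_congr_mem ?_
  intro x hx
  rw [PySem.List.mem_pyRange_one] at hx
  rw [marked_pyGet? vd g x hx.1, markRow_length]

theorem cellVal_marked (vd : PySem.Dict (Int × Int) Bool) (g : List (List Char)) (p : Int × Int)
    (hp : inGrid g p) :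
    cellVal (markedGrid vd g) p
      = if cellVal g p == '0' && !(vd.contains p) then 'w' else cellVal g p := by
  obtain ⟨h1, h2, h3, h4⟩ := hp
  unfold cellVal
  rw [marked_pyGet? vd g p.1 h1]
  rw [PySem.List.pyGet?_of_nonneg _ h3, PySem.List.pyGet?_of_nonneg _ h3]
  have hj : p.2.toNat < ((PySem.List.pyGet? g p.1).getD []).length := by omega
  unfold markRow
  rw [List.getElem?_map, PySem.List.getElem?_enumerate, List.getElem?_eq_getElem hj]
  simp only [Option.map_some, Option.getD_some, zero_add, Int.toNat_of_nonneg h1,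
    Int.toNat_of_nonneg h3, Prod.mk.eta]

theorem cellVal_marked_one (vd : PySem.Dict (Int × Int) Bool) (g : List (List Char))
    (c : Int × Int) (hc : inGrid g c) :
    (cellVal (markedGrid vd g) c == '1') = (cellVal g c == '1') := by
  rw [cellVal_marked vd g c hc]
  split
  · rename_i h
    simp only [Bool.and_eq_true, beq_iff_eq] at h
    rw [h.1]
    decide
  · rfl

theorem cellVal_marked_zero (vd : PySem.Dict (Int × Int) Bool) (g : List (List Char))
    (c : Int × Int) (hc : inGrid g c) :
    (cellVal (markedGrid vd g) c == '0') = (cellVal g c == '0' && vd.contains c) := by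
  rw [cellVal_marked vd g c hc]
  by_cases h2 : (cellVal g c == '0') = true
  · have h2' := eq_of_beq h2
    cases h1 : vd.contains c <;> simp [h2, h2', h1]
  · have h2' : (cellVal g c == '0') = false := by
      cases h : (cellVal g c == '0')
      · rfl
      · exact absurd h h2
    simp [h2']

theorem sum_map_flatMap {α β : Type} (l : List α) (f : α → List β) (F : β → Int) :
    ((l.flatMap f).map F).sum = (l.map (fun a => ((f a).map F).sum)).sum := by
  induction l with
  | nil => rfl
  | cons a t ih => simp [List.flatMap_cons, ih]

theorem count_eq (g2 : List (List Char)) :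
    ((PySem.List.enumerate g2).foldl (fun counter xl =>
      (PySem.List.enumerate xl.2).foldl (fun counter yv =>
        if yv.2 == '1' then
          (neigbours xl.1 yv.1 g2).foldl (fun counter w =>
            if cellVal g2 w == '0' then counter + 1 else counter) counter
        else counter) counter) 0)
    = ((gridList g2).map (fun c => if cellVal g2 c == '1'
        then (((neigbours c.1 c.2 g2).countP (fun w => cellVal g2 w == '0') : Nat) : Int)
        else 0)).sum := by
  rw [PySem.List.enumerate_eq_map_pyRange g2 []]
  rw [List.foldl_map]
  rw [PySem.List.foldl_congr_mem _ _ (fun (counter : Int) (x : Int) => counter +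
      ((PySem.List.enumerate (PySem.List.pyGetD g2 x [])).map (fun yv =>
        if yv.2 == '1'
        then (((neigbours x yv.1 g2).countP (fun w => cellVal g2 w == '0') : Nat) : Int)
        else 0)).sum) _ ?_]
  · rw [PySem.List.foldl_add, zero_add]
    unfold gridList
    rw [sum_map_flatMap]
    simp only [PySem.List.len_eq]
    apply congrArg
    apply List.map_congr_left
    intro x hx
    rw [PySem.List.mem_pyRange_one] at hx
    rw [PySem.List.enumerate_eq_map_pyRange _ '?']
    rw [List.map_map, List.map_map, PySem.List.len_eq]
    apply congrArg
    apply List.map_congr_left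
    intro y hy
    rfl
  · intro counter x hx
    rw [PySem.List.foldl_congr_mem _ _ (fun (counter : Int) (yv : Int × Char) => counter +
        (if yv.2 == '1'
         then (((neigbours x yv.1 g2).countP (fun w => cellVal g2 w == '0') : Nat) : Int)
         else 0)) _ ?_]
    · rw [PySem.List.foldl_add]
    · intro acc yv _
      by_cases h : (yv.2 == '1') = true
      · simp only [h, if_true]
        rw [PySem.List.foldl_if_add_one]
      · simp only [h, Bool.false_eq_true, if_false, add_zero]

-- ----- double counting: land-side edge count = ocean-side edge count -----

theorem countP_or_disjoint {α : Type} (l : List α) (p q : α → Bool)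
    (h : ∀ a, ¬(p a = true ∧ q a = true)) :
    l.countP (fun a => p a || q a) = l.countP p + l.countP q := by
  induction l with
  | nil => simp
  | cons a t ih =>
    simp only [List.countP_cons, ih]
    cases hp : p a <;> cases hq : q a <;> simp <;> try omega
    exact absurd ⟨hp, hq⟩ (h a)

theorem countP_beq_single {α : Type} [BEq α] [LawfulBEq α] (l : List α) (hl : l.Nodup)
    (v : α) (p : α → Bool) :
    l.countP (fun w => p w && (w == v)) = if v ∈ l ∧ p v = true then 1 else 0 := by
  induction l with
  | nil => simp
  | cons a t ih =>
    rw [List.nodup_cons] at hl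
    rw [List.countP_cons, ih hl.2]
    by_cases hav : a = v
    · subst hav
      have hvt : a ∉ t := hl.1
      simp only [List.mem_cons, true_or, true_and, hvt, false_and, if_false, beq_self_eq_true,
        Bool.and_true]
      cases hp : p a <;> simp [hp]
    · have hbeq : (a == v) = false := by simp [hav]
      have hne : ¬ v = a := fun hh => hav hh.symm
      simp [hbeq, hne, List.mem_cons]

theorem count_swap (g : List (List Char)) (v : Int × Int) (hv : inGrid g v) :
    (gridList g).countP (fun c => (cellVal g c == '1') && decide (v ∈ neigbours c.1 c.2 g))
      = (neigbours v.1 v.2 g).countP (fun w => cellVal g w == '1') := by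
  rw [List.countP_eq_length_filter, List.countP_eq_length_filter]
  refine List.Perm.length_eq ?_
  rw [List.perm_ext_iff_of_nodup ((nodup_gridList g).filter _)
    ((nodup_neigbours v.1 v.2 g).filter _)]
  intro c
  rw [List.mem_filter, List.mem_filter]
  simp only [Bool.and_eq_true, decide_eq_true_eq, mem_gridList, beq_iff_eq]
  constructor
  · rintro ⟨hc, h1, h2⟩
    rw [mem_neigbours] at h2
    exact ⟨mem_neigbours.2 ⟨mem_fourNbrs_comm.1 h2.1, hc⟩, h1⟩
  · rintro ⟨h2, h1⟩
    rw [mem_neigbours] at h2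
    exact ⟨h2.2, h1, mem_neigbours.2 ⟨mem_fourNbrs_comm.1 h2.1, hv⟩⟩

theorem sum_map_add_split {α : Type} (l : List α) (f h : α → Int) :
    (l.map (fun a => f a + h a)).sum = (l.map f).sum + (l.map h).sum := by
  induction l with
  | nil => simp
  | cons a t ih => simp [ih]; ring

theorem double_count (g : List (List Char)) (V : List (Int × Int))
    (hN : V.Nodup) (hG : ∀ c ∈ V, inGrid g c) (hO : ∀ c ∈ V, cellVal g c = '0') :
    ((gridList g).map (fun c => if cellVal g c == '1'
        then (((neigbours c.1 c.2 g).countP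
            (fun w => cellVal g w == '0' && decide (w ∈ V)) : Nat) : Int)
        else 0)).sum
      = (V.map (fun c => ((landCnt g c : Nat) : Int))).sum := by
  induction V using List.reverseRecOn with
  | nil => simp
  | append_singleton V v ih =>
    have hvV : v ∉ V := by
      intro hmem
      have hd := (List.nodup_append.1 hN).2.2
      exact hd v hmem v (List.mem_singleton.2 rfl) rfl
    have hNV : V.Nodup := (List.nodup_append.1 hN).1
    have hGV : ∀ c ∈ V, inGrid g c := fun c hc => hG c (List.mem_append.2 (Or.inl hc))
    have hOV : ∀ c ∈ V, cellVal g c = '0' := fun c hc => hO c (List.mem_append.2 (Or.inl hc))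
    have hgv : inGrid g v := hG v (List.mem_append.2 (Or.inr (List.mem_singleton.2 rfl)))
    have hov : cellVal g v = '0' := hO v (List.mem_append.2 (Or.inr (List.mem_singleton.2 rfl)))
    have hsplit : ∀ c : Int × Int,
        (neigbours c.1 c.2 g).countP (fun w => cellVal g w == '0' && decide (w ∈ V ++ [v]))
          = (neigbours c.1 c.2 g).countP (fun w => cellVal g w == '0' && decide (w ∈ V))
            + (if v ∈ neigbours c.1 c.2 g ∧ (cellVal g v == '0') = true then 1 else 0) := by
      intro c
      rw [List.countP_congr (q := fun w => (cellVal g w == '0' && decide (w ∈ V))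
          || (cellVal g w == '0' && (w == v))) ?_]
      · rw [countP_or_disjoint _ _ _ ?_]
        · rw [countP_beq_single _ (nodup_neigbours c.1 c.2 g) v (fun w => cellVal g w == '0')]
        · intro a ⟨h1, h2⟩
          simp only [Bool.and_eq_true] at h1 h2
          rw [eq_of_beq h2.2] at h1
          exact hvV (by simpa using h1.2)
      · intro w _
        by_cases hwv : w = v
        · subst hwv
          cases hcv : (cellVal g w == '0') <;> simp [hcv]
        · have hbeq : (w == v) = false := by simp [hwv]
          simp [List.mem_append, hwv, hbeq]
    have hpoint : ∀ c ∈ gridList g,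
        (if cellVal g c == '1'
          then (((neigbours c.1 c.2 g).countP
              (fun w => cellVal g w == '0' && decide (w ∈ V ++ [v])) : Nat) : Int)
          else 0)
        = (if cellVal g c == '1'
            then (((neigbours c.1 c.2 g).countP
                (fun w => cellVal g w == '0' && decide (w ∈ V)) : Nat) : Int)
            else 0)
          + (if (cellVal g c == '1') && decide (v ∈ neigbours c.1 c.2 g) then 1 else 0) := by
      intro c _
      rw [hsplit c]
      by_cases h1 : (cellVal g c == '1') = true
      · simp only [h1, if_true, Bool.true_and]
        by_cases h2 : v ∈ neigbours c.1 c.2 g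
        · simp [h2, hov]
        · simp [h2]
      · simp only [h1, Bool.false_eq_true, if_false, Bool.false_and, add_zero]
    rw [List.map_congr_left hpoint, sum_map_add_split, ih hNV hGV hOV]
    have hsec : ((gridList g).map
        (fun c => if (cellVal g c == '1') && decide (v ∈ neigbours c.1 c.2 g)
          then (1 : Int) else 0)).sum = ((landCnt g v : Nat) : Int) := by
      rw [PySem.List.sum_map_ite_one_zero]
      rw [count_swap g v hgv]
      rfl
    rw [hsec, List.map_append, List.sum_append]
    simp

-- ----- final assembly -----

theorem wrapCoast_cons (input : List String) :
    wrapCoast input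
      = List.replicate (2 + ((PySem.List.pyGet? input 0).getD "").toList.length) '0'
        :: (input.map (fun row => '0' :: (row.toList ++ ['0']))
            ++ [List.replicate (2 + ((PySem.List.pyGet? input 0).getD "").toList.length) '0']) := by
  unfold wrapCoast
  rw [List.cons_append]

theorem wrap_inGrid00 (input : List String) : inGrid (wrapCoast input) (0, 0) := by
  refine ⟨le_refl 0, ?_, le_refl 0, ?_⟩
  · rw [wrapCoast_cons]
    simp only [List.length_cons]
    omega
  · rw [wrapCoast_cons, PySem.List.pyGet?_zero_cons]
    simp only [Option.getD_some, List.length_replicate]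
    omega

theorem wrap_ocean00 (input : List String) : cellVal (wrapCoast input) (0, 0) = '0' := by
  unfold cellVal
  rw [wrapCoast_cons, PySem.List.pyGet?_zero_cons]
  simp only [Option.getD_some]
  rw [PySem.List.pyGet?_zero]
  rw [List.getElem?_replicate]
  rw [if_pos (by omega)]
  rfl

theorem A_pipeline (g : List (List Char)) (h0 : inGrid g (0, 0))
    (hO0 : cellVal g (0, 0) = '0') :
    ((PySem.List.enumerate
        (markedGrid (swim (totalCells g + 1) 0 0 g PySem.Dict.empty) g)).foldl
      (fun counter xl =>
        (PySem.List.enumerate xl.2).foldl (fun counter yv =>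
          if yv.2 == '1' then
            (neigbours xl.1 yv.1
                (markedGrid (swim (totalCells g + 1) 0 0 g PySem.Dict.empty) g)).foldl
              (fun counter w =>
                if cellVal (markedGrid (swim (totalCells g + 1) 0 0 g PySem.Dict.empty) g) w == '0'
                then counter + 1 else counter) counter
          else counter) counter) 0)
    = (coastFill (1 + 5 * totalCells g) [((0:Int), (0:Int))] PySem.Set.empty 0 g).2 := by
  obtain ⟨hND, hmemV, hctr⟩ := fill_main g h0
  rw [count_eq]
  rw [hctr]
  rw [gridList_marked]
  have hpt : ∀ c ∈ gridList g,
      (if cellVal (markedGrid (swim (totalCells g + 1) 0 0 g PySem.Dict.empty) g) c == '1'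
        then (((neigbours c.1 c.2
            (markedGrid (swim (totalCells g + 1) 0 0 g PySem.Dict.empty) g)).countP
            (fun w => cellVal (markedGrid (swim (totalCells g + 1) 0 0 g PySem.Dict.empty) g) w
              == '0') : Nat) : Int)
        else 0)
      = (if cellVal g c == '1'
        then (((neigbours c.1 c.2 g).countP
            (fun w => cellVal g w == '0' &&
              decide (w ∈ (coastFill (1 + 5 * totalCells g) [((0:Int), (0:Int))]
                PySem.Set.empty 0 g).1)) : Nat) : Int)
        else 0) := by
    intro c hc
    have hcg : inGrid g c := mem_gridList.1 hc
    rw [cellVal_marked_one _ g c hcg, neigbours_marked]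
    have hcnt : (neigbours c.1 c.2 g).countP
        (fun w => cellVal (markedGrid (swim (totalCells g + 1) 0 0 g PySem.Dict.empty) g) w == '0')
        = (neigbours c.1 c.2 g).countP
          (fun w => cellVal g w == '0' &&
            decide (w ∈ (coastFill (1 + 5 * totalCells g) [((0:Int), (0:Int))]
              PySem.Set.empty 0 g).1)) := by
      apply List.countP_congr
      intro w hw
      have hwg : inGrid g w := (mem_neigbours.1 hw).2
      rw [cellVal_marked_zero _ g w hwg]
      have hiff : (swim (totalCells g + 1) 0 0 g PySem.Dict.empty).contains w = true
          ↔ w ∈ (coastFill (1 + 5 * totalCells g) [((0:Int), (0:Int))]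
              PySem.Set.empty 0 g).1 :=
        (swim_reach g h0 w).trans (hmemV w).symm
      by_cases hwV : w ∈ (coastFill (1 + 5 * totalCells g) [((0:Int), (0:Int))]
          PySem.Set.empty 0 g).1
      · rw [hiff.2 hwV, decide_eq_true hwV, Bool.and_true]
      · have hfalse : (swim (totalCells g + 1) 0 0 g PySem.Dict.empty).contains w = false := by
          cases h : (swim (totalCells g + 1) 0 0 g PySem.Dict.empty).contains w
          · rfl
          · exact absurd (hiff.1 h) hwV
        rw [hfalse, decide_eq_false hwV, Bool.and_false]
    rw [hcnt]
  rw [List.map_congr_left hpt]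
  exact double_count g _ hND
    (fun c hc => reach_inGrid h0 ((hmemV c).1 hc))
    (fun c hc => reach_ocean hO0 ((hmemV c).1 hc))

-- ===== VERDICT (by name: the statement is the Claim_ definition above) =====
theorem calculate_coast_length_spec : Claim_equal_calculate_coast_length := by
  intro input _ _
  unfold Spec_calculate_coast_length
  exact A_pipeline (wrapCoast input) (wrap_inGrid00 input) (wrap_ocean00 input)
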